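-- pv_equiv track=rewrite | github.com/paveleroshkinweb/algorithms | algorithms/src/problems/profitable_startup.py | split_profit
-- ===== SOURCE A (Python) =====
-- def split_profit(n, k, d):
--     if n % k == 0:
--         return str(n) + ('0' * d)
--
--     profit = -1
--
--     for i in range(0, 10):
--         profit = n * 10 + i
--         if profit % k == 0:
--             break
--     else:
--         return str(-1)
--
--     return str(profit) + ('0' * (d-1))
-- ===== SOURCE B (Python) =====
-- def split_profit(n, k, d):
--     if n % k == 0:
--         return str(n) + '0' * d
--     need = (-(n * 10)) % abs(k)
--     if need < 10:
--         return str(n * 10 + need) + '0' * (d - 1)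
--     return str(-1)
-- ===== Notes on version B (the rewrite author's own statement) =====
-- stated objective: simpler
-- what changed: The 10-iteration digit search with for-else is replaced by a closed-form modular computation: need = (-(n*10)) % abs(k) is exactly the first digit the loop would find, so the loop disappears.
import Mathlib
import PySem

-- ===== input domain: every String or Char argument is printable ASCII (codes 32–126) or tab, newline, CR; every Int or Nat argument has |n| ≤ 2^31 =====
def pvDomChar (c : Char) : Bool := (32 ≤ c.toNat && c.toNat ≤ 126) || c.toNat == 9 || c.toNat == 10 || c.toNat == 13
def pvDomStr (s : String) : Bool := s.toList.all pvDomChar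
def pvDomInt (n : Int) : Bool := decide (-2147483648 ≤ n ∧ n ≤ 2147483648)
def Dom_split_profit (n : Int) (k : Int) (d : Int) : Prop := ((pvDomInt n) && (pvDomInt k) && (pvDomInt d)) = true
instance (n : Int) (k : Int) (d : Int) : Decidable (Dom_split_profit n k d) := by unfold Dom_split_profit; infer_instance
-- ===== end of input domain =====

-- B replaces A's 10-iteration digit search (for-else) by one closed-form modular computation; objective: simpler.

-- ===== PORT A =====
-- '0' * m  (Python string repetition; empty for m ≤ 0); shared primitive of both ports
def zeros (m : Int) : String := String.ofList (PySem.List.pyRepeat ['0'] m)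

-- the for-loop with break/else: some profit at the first i with profit % k == 0, none if the loop falls through
def loopA (n : Int) (k : Int) : List Int → Option Int
  | [] => none
  | i :: rest =>
    let profit := n * 10 + i
    if PySem.Int.mod profit k == 0 then some profit else loopA n k rest

def split_profit (n : Int) (k : Int) (d : Int) : String :=
  if PySem.Int.mod n k == 0 then
    PySem.Int.toStr n ++ zeros d
  else
    match loopA n k (PySem.List.pyRange 0 10 1) with
    | some profit => PySem.Int.toStr profit ++ zeros (d - 1)
    | none => PySem.Int.toStr (-1)

-- ===== PORT B =====
def split_profit_alt (n : Int) (k : Int) (d : Int) : String :=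
  if PySem.Int.mod n k == 0 then
    PySem.Int.toStr n ++ zeros d
  else
    let need := PySem.Int.mod (-(n * 10)) |k|
    if need < 10 then PySem.Int.toStr (n * 10 + need) ++ zeros (d - 1)
    else PySem.Int.toStr (-1)

-- ===== PRECONDITION & SPEC =====
-- Pre_ excludes exactly k = 0, where Python A raises ZeroDivisionError at the first guard.
def Pre_split_profit (n : Int) (k : Int) (d : Int) : Prop := k ≠ 0
instance (n : Int) (k : Int) (d : Int) : Decidable (Pre_split_profit n k d) := by unfold Pre_split_profit; infer_instance
def pvWitness_split_profit : Int × Int × Int := (7, 3, 2)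

def Spec_split_profit (n : Int) (k : Int) (d : Int) (out : String) : Prop := out = split_profit_alt n k d
instance (n : Int) (k : Int) (d : Int) (out : String) : Decidable (Spec_split_profit n k d out) := by unfold Spec_split_profit; infer_instance

-- ===== CLAIM (what is proved, stated in full; the proofs are below) =====
def Claim_equal_split_profit : Prop := ∀ (n : Int) (k : Int) (d : Int), Dom_split_profit n k d → Pre_split_profit n k d → Spec_split_profit n k d (split_profit n k d)

-- ===== LEMMAS AND PROOFS =====

-- the loop's test at digit i is divisibility of i - need by |k|
lemma cond_iff (n k i : Int) (hk : k ≠ 0) :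
    (PySem.Int.mod (n * 10 + i) k = 0) ↔ |k| ∣ (i - PySem.Int.mod (-(n * 10)) |k|) := by
  have hkpos : (0:Int) < |k| := abs_pos.mpr hk
  rw [PySem.Int.mod_eq_zero_iff_dvd, PySem.Int.mod_eq_emod_of_pos hkpos]
  have h2 : |k| ∣ (-(n * 10) - (-(n * 10)) % |k|) :=
    ⟨(-(n * 10)) / |k|, by have := Int.ediv_add_emod (-(n * 10)) |k|; linarith⟩
  have h3 : |k| ∣ (n * 10 + (-(n * 10)) % |k|) := by
    rw [show -(n * 10) - (-(n * 10)) % |k| = -(n * 10 + (-(n * 10)) % |k|) by ring] at h2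
    exact (dvd_neg).mp h2
  constructor
  · intro h
    have := dvd_sub ((abs_dvd k _).mpr h) h3
    rwa [show n * 10 + i - (n * 10 + (-(n * 10)) % |k|) = i - (-(n * 10)) % |k| by ring] at this
  · intro h
    have := dvd_add h3 h
    rw [show n * 10 + (-(n * 10)) % |k| + (i - (-(n * 10)) % |k|) = n * 10 + i by ring] at this
    exact (abs_dvd k _).mp this

-- the loop starting at digit a ≤ need finds exactly need (if it is a digit), else falls through
lemma loopA_from (n k : Int) (hk : k ≠ 0) :
    ∀ (m : Nat) (a : Int), (10 - a).toNat = m → 0 ≤ a → a ≤ PySem.Int.mod (-(n * 10)) |k| →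
      loopA n k (PySem.List.pyRange a 10 1) =
        (if PySem.Int.mod (-(n * 10)) |k| < 10 then some (n * 10 + PySem.Int.mod (-(n * 10)) |k|) else none) := by
  have hkpos : (0:Int) < |k| := abs_pos.mpr hk
  have hrlt : PySem.Int.mod (-(n * 10)) |k| < |k| := PySem.Int.mod_lt _ hkpos
  intro m
  induction m with
  | zero =>
    intro a hm _ har
    have h10 : (10:Int) ≤ a := by omega
    rw [PySem.List.pyRange_one_eq_nil h10]
    rw [if_neg (by omega)]
    rfl
  | succ m ih =>
    intro a hm ha0 har
    have hlt : a < 10 := by omega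
    rw [PySem.List.pyRange_one_cons hlt]
    show (if PySem.Int.mod (n * 10 + a) k == 0 then some (n * 10 + a)
          else loopA n k (PySem.List.pyRange (a + 1) 10 1)) = _
    by_cases heq : a = PySem.Int.mod (-(n * 10)) |k|
    · rw [if_pos]
      · rw [if_pos (by omega), heq]
      · simp only [beq_iff_eq]
        exact (cond_iff n k a hk).mpr (by rw [heq]; simp)
    · have hstrict : a < PySem.Int.mod (-(n * 10)) |k| := lt_of_le_of_ne har heq
      rw [if_neg, ih (a + 1) (by omega) (by omega) (by omega)]
      simp only [beq_iff_eq]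
      intro hc
      have hd := (cond_iff n k a hk).mp hc
      have : a - PySem.Int.mod (-(n * 10)) |k| = 0 :=
        Int.eq_zero_of_abs_lt_dvd hd (by rw [abs_of_nonpos (by omega)]; omega)
      omega

lemma loopA_spec (n k : Int) (hk : k ≠ 0) :
    loopA n k (PySem.List.pyRange 0 10 1) =
      (if PySem.Int.mod (-(n * 10)) |k| < 10 then some (n * 10 + PySem.Int.mod (-(n * 10)) |k|) else none) :=
  loopA_from n k hk 10 0 rfl le_rfl (PySem.Int.mod_nonneg _ (abs_pos.mpr hk))

-- ===== VERDICT (by name: the statement is the Claim_ definition above) =====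
theorem split_profit_spec : Claim_equal_split_profit := by
  intro n k d _ hk
  unfold Spec_split_profit split_profit split_profit_alt
  by_cases h0 : PySem.Int.mod n k == 0
  · simp [h0]
  · simp only [h0, Bool.false_eq_true, if_false]
    rw [loopA_spec n k hk]
    by_cases h1 : PySem.Int.mod (-(n * 10)) |k| < 10 <;> simp [h1]
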